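-- pv_equiv track=rewrite | github.com/OortCloudd/CorneaNet-AI | src/corneaforge/computed_indices.py | _zernike_generate_modes
-- ===== SOURCE A (Python) =====
-- _ZERNIKE_MAX_ORDER = 8  # 45 terms (j=0..44) — used by OPD pipeline
--
-- def _zernike_generate_modes(max_order=_ZERNIKE_MAX_ORDER):
--     """
--     Generate (j, n, m) tuples for all Zernike terms up to max_order.
--
--     Returns list of (j, n, m) where j is the OSA/ANSI single index.
--     """
--     modes = []
--     j = 0
--     for n in range(max_order + 1):
--         for m in range(-n, n + 1, 2):
--             modes.append((j, n, m))
--             j += 1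
--     return modes
-- ===== SOURCE B (Python) =====
-- _ZERNIKE_MAX_ORDER = 8  # 45 terms (j=0..44) — used by OPD pipeline
--
-- def _zernike_generate_modes(max_order=_ZERNIKE_MAX_ORDER):
--     """
--     Generate (j, n, m) tuples for all Zernike terms up to max_order.
--
--     Returns list of (j, n, m) where j is the OSA/ANSI single index.
--
--     Single flat loop over the OSA index j; the radial order n is advanced
--     whenever j crosses the next triangular-number row boundary, and the
--     azimuthal frequency is decoded as m = 2*j - n*(n+2).
--     """
--     total = (max_order + 1) * (max_order + 2) // 2 if max_order >= 0 else 0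
--     modes = []
--     n = 0
--     nxt = 1  # first index of the next radial order, the triangular number T(n+1)
--     for j in range(total):
--         if j == nxt:
--             n += 1
--             nxt += n + 1
--         modes.append((j, n, 2 * j - n * (n + 2)))
--     return modes
-- ===== Notes on version B (the rewrite author's own statement) =====
-- stated objective: alternative
-- what changed: Replaces the nested (n,m) loops with a running counter by a single flat loop over the OSA index j itself: the number of modes is computed up front as the triangular number (max_order+1)(max_order+2)//2, n is advanced when j crosses the next triangular-number row boundary, and m is decoded in closed form as 2*j - n*(n+2).
import Mathlib
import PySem

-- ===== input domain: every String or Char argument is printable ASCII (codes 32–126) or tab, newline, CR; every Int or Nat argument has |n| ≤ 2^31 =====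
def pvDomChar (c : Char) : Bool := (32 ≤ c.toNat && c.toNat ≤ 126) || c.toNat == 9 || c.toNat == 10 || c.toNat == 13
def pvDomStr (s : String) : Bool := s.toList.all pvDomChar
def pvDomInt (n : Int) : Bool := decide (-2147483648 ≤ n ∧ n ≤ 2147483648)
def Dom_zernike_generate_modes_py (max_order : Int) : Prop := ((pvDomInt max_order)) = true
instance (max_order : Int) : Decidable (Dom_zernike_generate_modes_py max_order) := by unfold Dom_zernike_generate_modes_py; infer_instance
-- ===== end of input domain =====

-- B replaces the nested (n,m) loops with a running counter by a single flat loop over the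
-- OSA index j, advancing n at triangular-number row boundaries and decoding m = 2*j - n*(n+2)
-- (objective: alternative traversal of the same mode list).

-- ===== PORT A =====
-- modes = []; j = 0; for n in range(max_order+1): for m in range(-n, n+1, 2): modes.append((j,n,m)); j += 1
def zernike_generate_modes_py (max_order : Int) : List (Int × Int × Int) :=
  ((PySem.List.pyRange 0 (max_order + 1) 1).foldl
    (fun (st : List (Int × Int × Int) × Int) n =>
      (PySem.List.pyRange (-n) (n + 1) 2).foldl
        (fun st m => (st.1 ++ [(st.2, n, m)], st.2 + 1)) st)
    ([], 0)).1

-- ===== PORT B =====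
-- total = (max_order+1)*(max_order+2)//2 if max_order >= 0 else 0
-- modes = []; n = 0; nxt = 1
-- for j in range(total):
--     if j == nxt: n += 1; nxt += n + 1
--     modes.append((j, n, 2*j - n*(n+2)))
def zernike_generate_modes_py_alt (max_order : Int) : List (Int × Int × Int) :=
  ((PySem.List.pyRange 0
      (if max_order ≥ 0 then PySem.Int.floordiv ((max_order + 1) * (max_order + 2)) 2 else 0)
      1).foldl
    (fun (st : List (Int × Int × Int) × Int × Int) j =>
      if j = st.2.2 then
        (st.1 ++ [(j, st.2.1 + 1, 2 * j - (st.2.1 + 1) * (st.2.1 + 1 + 2))],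
         st.2.1 + 1, st.2.2 + (st.2.1 + 1) + 1)
      else
        (st.1 ++ [(j, st.2.1, 2 * j - st.2.1 * (st.2.1 + 2))], st.2.1, st.2.2))
    ([], 0, 1)).1

-- ===== PRECONDITION & SPEC =====
def Spec_zernike_generate_modes_py (max_order : Int) (out : List (Int × Int × Int)) : Prop := out = zernike_generate_modes_py_alt max_order
instance (max_order : Int) (out : List (Int × Int × Int)) : Decidable (Spec_zernike_generate_modes_py max_order out) := by unfold Spec_zernike_generate_modes_py; infer_instance

-- ===== CLAIM (what is proved, stated in full; the proofs are below) =====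
def Claim_equal_zernike_generate_modes_py : Prop := ∀ (max_order : Int), Dom_zernike_generate_modes_py max_order → Spec_zernike_generate_modes_py max_order (zernike_generate_modes_py max_order)

-- ===== LEMMAS AND PROOFS =====

-- triangular numbers
def pvT (n : Nat) : Nat := n * (n + 1) / 2

lemma pvT_two (n : Nat) : 2 * pvT n = n * (n + 1) := by
  unfold pvT
  obtain ⟨c, hc⟩ := Nat.even_mul_succ_self n
  omega

lemma pvT_succ (n : Nat) : pvT (n + 1) = pvT n + (n + 1) := by
  have h1 := pvT_two n; have h2 := pvT_two (n + 1)
  have : (n+1)*(n+1+1) = n*(n+1) + 2*(n+1) := by ring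
  omega

-- the canonical mode list: rows n = 0..N-1, entries k = 0..n with j = T n + k, m = 2k - n
def pvCanon (N : Nat) : List (Int × Int × Int) :=
  (List.range N).flatMap (fun n =>
    (List.range (n + 1)).map (fun k =>
      (((pvT n + k : Nat) : Int), (n : Int), 2 * (k : Int) - (n : Int))))

-- B's loop body
def pvStepB (st : List (Int × Int × Int) × Int × Int) (j : Int) :
    List (Int × Int × Int) × Int × Int :=
  if j = st.2.2 then
    (st.1 ++ [(j, st.2.1 + 1, 2 * j - (st.2.1 + 1) * (st.2.1 + 1 + 2))],
     st.2.1 + 1, st.2.2 + (st.2.1 + 1) + 1)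
  else
    (st.1 ++ [(j, st.2.1, 2 * j - st.2.1 * (st.2.1 + 2))], st.2.1, st.2.2)

-- ---- A-side: the nested fold builds pvCanon ----

-- range(-n, n+1, 2) as a mapped List.range (for 0 ≤ n)
lemma pv_inner_range (n : Int) (hn : 0 ≤ n) :
    PySem.List.pyRange (-n) (n + 1) 2
      = (List.range (n + 1).toNat).map (fun (k : Nat) => -n + 2 * (k : Int)) := by
  rw [PySem.List.pyRange_of_pos _ _ (by norm_num : (0:Int) < 2)]
  have h1 : (-n < n + 1) := by omega
  simp only [h1, if_true]
  have h2 : (n + 1 - -n + 2 - 1) / 2 = n + 1 := by omega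
  rw [h2]

-- the inner fold appends the row, advancing the counter by its length
lemma pv_inner_fold (n : Int) (K : Nat) (acc : List (Int × Int × Int)) (j : Int) :
    ((List.range K).map (fun (k : Nat) => -n + 2 * (k : Int))).foldl
      (fun st m => (st.1 ++ [(st.2, n, m)], st.2 + 1)) (acc, j)
    = (acc ++ (List.range K).map (fun (k : Nat) => (j + (k : Int), n, -n + 2 * (k : Int))), j + K) := by
  induction K with
  | zero => simp
  | succ K ih =>
    rw [List.range_succ, List.map_append, List.foldl_append, ih]
    simp only [List.map_cons, List.map_nil, List.foldl_cons, List.foldl_nil,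
      List.map_append, Prod.mk.injEq]
    exact ⟨by rw [List.append_assoc], by omega⟩

-- master invariant of A's outer fold: state = (canonical list so far, triangular counter)
lemma pv_masterA (N : Nat) :
    ((List.range N).map (fun (k : Nat) => (k : Int))).foldl
      (fun (st : List (Int × Int × Int) × Int) n =>
        (PySem.List.pyRange (-n) (n + 1) 2).foldl
          (fun st m => (st.1 ++ [(st.2, n, m)], st.2 + 1)) st)
      ([], 0)
    = (pvCanon N, ((pvT N : Nat) : Int)) := by
  induction N with
  | zero => simp [pvCanon, pvT]
  | succ N ih =>
    rw [List.range_succ, List.map_append, List.foldl_append, ih]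
    simp only [List.map_cons, List.map_nil, List.foldl_cons, List.foldl_nil]
    rw [pv_inner_range _ (Int.natCast_nonneg N), pv_inner_fold]
    have hlen : ((N : Int) + 1).toNat = N + 1 := by omega
    unfold pvCanon
    rw [List.range_succ, List.flatMap_append, hlen, Prod.mk.injEq]
    constructor
    · simp only [List.flatMap_cons, List.flatMap_nil, List.append_nil]
      congr 1
      apply List.map_congr_left
      intro k hk
      simp only [Prod.mk.injEq]
      exact ⟨by push_cast; ring, trivial, by ring⟩
    · rw [pvT_succ]; push_cast; ring

-- peeling the last row off the canonical list
lemma pvCanon_succ (N : Nat) :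
    pvCanon (N + 1) = pvCanon N ++ (List.range (N + 1)).map (fun k =>
      (((pvT N + k : Nat) : Int), (N : Int), 2 * (k : Int) - (N : Int))) := by
  unfold pvCanon
  rw [List.range_succ, List.flatMap_append]
  simp
  rw [List.range_succ]
  simp

-- ---- B-side: the flat fold builds pvCanon ----

-- while j stays strictly below nxt, pvStepB never bumps
lemma pv_no_bump (t n nxt : Int) :
    ∀ (K : Nat) (acc : List (Int × Int × Int)),
      (∀ k : Nat, k < K → t + k ≠ nxt) →
      ((List.range K).map (fun (k : Nat) => t + (k : Int))).foldl pvStepB (acc, n, nxt)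
      = (acc ++ (List.range K).map (fun (k : Nat) =>
          (t + (k : Int), n, 2 * (t + (k : Int)) - n * (n + 2))), n, nxt) := by
  intro K
  induction K with
  | zero => intro acc _; simp
  | succ K ih =>
    intro acc h
    rw [List.range_succ, List.map_append, List.foldl_append,
      ih acc (fun k hk => h k (by omega))]
    simp only [List.map_cons, List.map_nil, List.foldl_cons, List.foldl_nil, List.map_append]
    have hne : t + (K : Int) ≠ nxt := h K (by omega)
    simp only [pvStepB, if_neg hne, List.append_assoc]

-- master invariant of B's fold over j = 0..T(N+1)-1
lemma pv_masterB (N : Nat) :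
    ((List.range (pvT (N + 1))).map (fun (k : Nat) => (k : Int))).foldl pvStepB ([], 0, 1)
    = (pvCanon (N + 1), ((N : Nat) : Int), ((pvT (N + 1) : Nat) : Int)) := by
  induction N with
  | zero =>
    simp only [pvT, pvCanon]
    decide
  | succ N ih =>
    have hsplit : pvT (N + 2) = pvT (N + 1) + (N + 2) := pvT_succ (N + 1)
    have h2T : 2 * pvT (N + 1) = (N + 1) * (N + 2) := pvT_two (N + 1)
    rw [hsplit, List.range_add, List.map_append, List.foldl_append, ih, List.map_map]
    have hpeel : (List.range (N + 2)) = 0 :: (List.range (N + 1)).map (· + 1) := by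
      rw [List.range_succ_eq_map]
    rw [hpeel]
    simp only [List.map_cons, List.foldl_cons, List.map_map]
    simp only [pvStepB]
    rw [if_pos (by simp)]
    simp only [Function.comp_apply]
    have hc : 2 * ((pvT (N + 1) : Nat) : Int) = ((N : Int) + 1) * ((N : Int) + 2) := by
      have h := congrArg (fun m : Nat => (m : Int)) h2T
      push_cast at h
      linear_combination h
    have hmapf : (((fun (k : Nat) => (k : Int)) ∘ fun x => pvT (N + 1) + x) ∘ fun x => x + 1)
        = fun (k : Nat) => (((pvT (N + 1) : Nat) : Int) + 1) + (k : Int) := by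
      funext k; simp only [Function.comp_apply]; push_cast; ring
    rw [hmapf, pv_no_bump _ _ _ _ _ (by intro k hk; omega)]
    simp only [Prod.mk.injEq]
    refine ⟨?_, by push_cast; ring, by push_cast; ring⟩
    rw [pvCanon_succ (N + 1), List.append_assoc]
    congr 1
    rw [hpeel]
    simp only [List.map_cons, List.map_map, List.singleton_append]
    congr 1
    · simp only [Prod.mk.injEq]
      refine ⟨trivial, by push_cast; ring, by push_cast; linear_combination hc⟩
    · apply List.map_congr_left
      intro k hk
      simp only [Function.comp_apply, Prod.mk.injEq]
      refine ⟨by push_cast; ring, rfl, by push_cast; linear_combination hc⟩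
-- ===== VERDICT (by name: the statement is the Claim_ definition above) =====
theorem zernike_generate_modes_py_spec : Claim_equal_zernike_generate_modes_py := by
  intro mo _
  unfold Spec_zernike_generate_modes_py zernike_generate_modes_py zernike_generate_modes_py_alt
  by_cases h : mo ≥ 0
  · rw [if_pos h]
    have hM : mo = ((mo.toNat : Nat) : Int) := by omega
    have h2 := congrArg (fun m : Nat => (m : Int)) (pvT_two (mo.toNat + 1))
    push_cast at h2
    have hprod : (mo + 1) * (mo + 2) = 2 * ((pvT (mo.toNat + 1) : Nat) : Int) := by
      conv_lhs => rw [hM]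
      linear_combination -h2
    have htot : PySem.Int.floordiv ((mo + 1) * (mo + 2)) 2 = ((pvT (mo.toNat + 1) : Nat) : Int) := by
      rw [PySem.Int.floordiv_eq_ediv_of_pos (by norm_num), hprod]
      omega
    rw [htot, PySem.List.pyRange_one, PySem.List.pyRange_one]
    have hN1 : ((mo + 1) - 0).toNat = mo.toNat + 1 := by omega
    have hN2 : (((pvT (mo.toNat + 1) : Nat) : Int) - 0).toNat = pvT (mo.toNat + 1) := by omega
    rw [hN1, hN2]
    simp only [zero_add]
    rw [pv_masterA (mo.toNat + 1)]
    exact (congrArg Prod.fst (pv_masterB mo.toNat)).symm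
  · rw [if_neg h]
    have h1 : ((mo + 1) - 0).toNat = 0 := by omega
    have h2 : ((0 : Int) - 0).toNat = 0 := by omega
    rw [PySem.List.pyRange_one, PySem.List.pyRange_one, h1, h2]
    simp
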